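-- pv_equiv track=rewrite | github.com/nazirite96/pythonStudy | level_primary/배열_만들기4.py | solution
-- ===== SOURCE A (Python) =====
-- def solution(arr):
--     stk = []
--
--     i = 0
--     while i < len(arr):
--         if len(stk) == 0:
--             stk.append(arr[i])
--             i += 1
--         else:
--             if stk[len(stk)-1] < arr[i]:
--                 stk.append(arr[i])
--                 i+=1
--             else:
--                 stk.pop(len(stk)-1)
--     return stk
-- ===== SOURCE B (Python) =====
-- def solution(arr):
--     kept = []
--     cur_min = None
--     for x in reversed(arr):
--         if cur_min is None or x < cur_min:
--             kept.append(x)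
--             cur_min = x
--     kept.reverse()
--     return kept
-- ===== Notes on version B (the rewrite author's own statement) =====
-- stated objective: simpler
-- what changed: Replaced the left-to-right pop-driven stack loop with a single right-to-left pass keeping each element iff it is below the running minimum of the suffix.
import Mathlib
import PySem

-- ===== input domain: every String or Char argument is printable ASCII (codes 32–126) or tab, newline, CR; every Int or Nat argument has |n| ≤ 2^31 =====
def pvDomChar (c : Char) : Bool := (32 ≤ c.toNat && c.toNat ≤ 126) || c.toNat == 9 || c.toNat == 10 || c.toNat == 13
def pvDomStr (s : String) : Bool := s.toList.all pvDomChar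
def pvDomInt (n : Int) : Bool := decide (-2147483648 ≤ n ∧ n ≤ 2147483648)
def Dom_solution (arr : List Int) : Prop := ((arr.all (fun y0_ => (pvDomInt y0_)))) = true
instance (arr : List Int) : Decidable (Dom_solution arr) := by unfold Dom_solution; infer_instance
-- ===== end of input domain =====

-- B replaces A's left-to-right pop-driven stack with a right-to-left running-minimum pass (objective: simpler).

-- ===== PORT A =====
-- while i < len(arr): push arr[i] when stack empty or top < arr[i] (then i += 1), else pop the top.
def solutionLoop (arr : List Int) (stk : List Int) (i : Nat) : List Int :=
  if h : i < arr.length then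
    if hs : stk = [] then
      solutionLoop arr (stk ++ [arr[i]]) (i + 1)
    else if stk.getLast hs < arr[i] then
      solutionLoop arr (stk ++ [arr[i]]) (i + 1)
    else
      solutionLoop arr stk.dropLast i
  else stk
termination_by 2 * (arr.length - i) + stk.length
decreasing_by
  · simp; omega
  · simp; omega
  · have hl : stk.length ≠ 0 := by simpa using hs
    simp [List.length_dropLast]; omega

def solution (arr : List Int) : List Int := solutionLoop arr [] 0

-- ===== PORT B =====
-- for x in reversed(arr): keep x when cur_min is None or x < cur_min; finally reverse the kept list.
def altStep (st : List Int × Option Int) (x : Int) : List Int × Option Int :=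
  match st.2 with
  | none => (st.1 ++ [x], some x)
  | some c => if x < c then (st.1 ++ [x], some x) else st

def solution_alt (arr : List Int) : List Int :=
  (arr.reverse.foldl altStep ([], none)).1.reverse

-- ===== PRECONDITION & SPEC =====
def Spec_solution (arr : List Int) (out : List Int) : Prop := out = solution_alt arr
instance (arr : List Int) (out : List Int) : Decidable (Spec_solution arr out) := by unfold Spec_solution; infer_instance

-- ===== CLAIM (what is proved, stated in full; the proofs are below) =====
def Claim_equal_solution : Prop := ∀ (arr : List Int), Dom_solution arr → Spec_solution arr (solution arr)

-- ===== LEMMAS AND PROOFS =====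

-- pops from the end of s while the last element is ≥ x (A's inner pop phase for the next element x)
def popTo (s : List Int) (x : Int) : List Int :=
  if hs : s = [] then []
  else if s.getLast hs < x then s else popTo s.dropLast x
termination_by s.length
decreasing_by
  have hl : s.length ≠ 0 := by simpa using hs
  simp [List.length_dropLast]; omega

def stepA (s : List Int) (x : Int) : List Int := popTo s x ++ [x]

-- the common mathematical description: keep x iff it is smaller than the head (= minimum) of the processed suffix
def gKeep : List Int → List Int
  | [] => []
  | x :: xs =>
    match gKeep xs with
    | [] => [x]
    | y :: r => if x < y then x :: y :: r else y :: r

def comb (s r : List Int) : List Int :=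
  match r with
  | [] => s
  | y :: r' => popTo s y ++ y :: r'

theorem popTo_nil (x : Int) : popTo [] x = [] := by simp [popTo]

theorem popTo_of_last_lt (s : List Int) (hs : s ≠ []) (x : Int) (h : s.getLast hs < x) :
    popTo s x = s := by rw [popTo]; simp [hs, h]

theorem popTo_of_last_ge (s : List Int) (hs : s ≠ []) (x : Int) (h : ¬ s.getLast hs < x) :
    popTo s x = popTo s.dropLast x := by rw [popTo]; simp [hs, h]

theorem popTo_append_lt (t : List Int) (x y : Int) (h : x < y) :
    popTo (t ++ [x]) y = t ++ [x] := by
  have hne : t ++ [x] ≠ [] := by simp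
  have hlast : (t ++ [x]).getLast hne = x := by simp
  rw [popTo_of_last_lt (t ++ [x]) hne y (by rw [hlast]; exact h)]

theorem popTo_popTo (s : List Int) (x y : Int) (h : y ≤ x) :
    popTo (popTo s x) y = popTo s y := by
  induction s using popTo.induct x with
  | case1 => simp [popTo_nil]
  | case2 s hs hlt => rw [popTo_of_last_lt s hs x hlt]
  | case3 s hs hge ih =>
      rw [popTo_of_last_ge s hs x hge, ih,
        popTo_of_last_ge s hs y (by intro hc; exact hge (lt_of_lt_of_le hc h))]

theorem foldl_stepA_eq_comb (l : List Int) : ∀ s : List Int,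
    List.foldl stepA s l = comb s (gKeep l) := by
  induction l with
  | nil => intro s; simp [comb, gKeep]
  | cons x xs ih =>
      intro s
      rw [List.foldl_cons, ih]
      cases hg : gKeep xs with
      | nil => simp [comb, gKeep, hg, stepA]
      | cons y r =>
          by_cases hxy : x < y
          · have : popTo (popTo s x ++ [x]) y = popTo s x ++ [x] :=
              popTo_append_lt _ _ _ hxy
            simp [comb, gKeep, hg, stepA, hxy, this]
          · have h1 : popTo (popTo s x ++ [x]) y = popTo (popTo s x) y := by
              rw [popTo_of_last_ge (popTo s x ++ [x]) (by simp) y (by simpa using hxy)]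
              simp
            have h2 : popTo (popTo s x) y = popTo s y :=
              popTo_popTo s x y (le_of_not_gt hxy)
            simp [comb, gKeep, hg, stepA, hxy, h1, h2]

theorem solutionLoop_eq_foldl (arr : List Int) : ∀ stk i,
    solutionLoop arr stk i = List.foldl stepA stk (arr.drop i) := by
  intro stk i
  induction stk, i using solutionLoop.induct arr with
  | case1 i h ih =>
      rw [solutionLoop, dif_pos h, dif_pos rfl, ih,
        List.drop_eq_getElem_cons h, List.foldl_cons]
      simp [stepA, popTo_nil]
  | case2 stk i h hs hlt ih =>
      rw [solutionLoop, dif_pos h, dif_neg hs, if_pos hlt, ih,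
        List.drop_eq_getElem_cons h, List.foldl_cons,
        stepA, popTo_of_last_lt stk hs _ hlt]
  | case3 stk i h hs hge ih =>
      rw [solutionLoop, dif_pos h, dif_neg hs, if_neg hge, ih,
        List.drop_eq_getElem_cons h, List.foldl_cons]
      have hstep : stepA stk arr[i] = stepA stk.dropLast arr[i] := by
        rw [stepA, stepA, popTo_of_last_ge stk hs _ hge]
      rw [List.foldl_cons, ← hstep]
  | case4 stk i h =>
      rw [solutionLoop, dif_neg h, List.drop_eq_nil_of_le (by omega), List.foldl_nil]

theorem solution_eq_gKeep (arr : List Int) : solution arr = gKeep arr := by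
  rw [solution, solutionLoop_eq_foldl arr [] 0, List.drop_zero, foldl_stepA_eq_comb]
  cases hg : gKeep arr with
  | nil => rfl
  | cons y r => simp [comb, popTo_nil]

theorem foldr_altStep (l : List Int) :
    List.foldr (fun x st => altStep st x) (([], none) : List Int × Option Int) l
      = ((gKeep l).reverse, (gKeep l).head?) := by
  induction l with
  | nil => simp [gKeep]
  | cons x xs ih =>
      rw [List.foldr_cons, ih]
      cases hg : gKeep xs with
      | nil => simp [altStep, gKeep, hg]
      | cons y r =>
          by_cases hxy : x < y
          · simp [altStep, gKeep, hg, hxy]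
          · simp [altStep, gKeep, hg, hxy]

theorem solution_alt_eq_gKeep (arr : List Int) : solution_alt arr = gKeep arr := by
  rw [solution_alt, List.foldl_reverse, foldr_altStep]
  simp

-- ===== VERDICT (by name: the statement is the Claim_ definition above) =====
theorem solution_spec : Claim_equal_solution := by
  intro arr _
  unfold Spec_solution
  rw [solution_eq_gKeep, solution_alt_eq_gKeep]
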